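-- pv_equiv track=rewrite | github.com/adamsh231/backpropagation | Fix/jst-bp-uji.py | bin_enc
-- ===== SOURCE A (Python) =====
-- def bin_enc(lbl):
--     mi = min(lbl)
--     length = len(bin(max(lbl) - mi + 1)[2:])
--     enc = []
--
--     for i in lbl:
--         b = bin(i - mi)[2:].zfill(length)
--
--         enc.append([int(n) for n in b])
--
--     return enc
-- ===== SOURCE B (Python) =====
-- def bin_enc(lbl):
--     mi = min(lbl)
--     length = len(bin(max(lbl) - mi + 1)[2:])
--     return [[((i - mi) >> (length - 1 - k)) & 1 for k in range(length)]
--             for i in lbl]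
-- ===== Notes on version B (the rewrite author's own statement) =====
-- stated objective: alternative
-- what changed: Each code word is produced arithmetically by shifting and masking the offset value bit by bit (MSB-first over bit positions) instead of formatting a binary string, zero-filling it and re-parsing its characters; the output list is built by a comprehension rather than repeated appends.
import Mathlib
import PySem

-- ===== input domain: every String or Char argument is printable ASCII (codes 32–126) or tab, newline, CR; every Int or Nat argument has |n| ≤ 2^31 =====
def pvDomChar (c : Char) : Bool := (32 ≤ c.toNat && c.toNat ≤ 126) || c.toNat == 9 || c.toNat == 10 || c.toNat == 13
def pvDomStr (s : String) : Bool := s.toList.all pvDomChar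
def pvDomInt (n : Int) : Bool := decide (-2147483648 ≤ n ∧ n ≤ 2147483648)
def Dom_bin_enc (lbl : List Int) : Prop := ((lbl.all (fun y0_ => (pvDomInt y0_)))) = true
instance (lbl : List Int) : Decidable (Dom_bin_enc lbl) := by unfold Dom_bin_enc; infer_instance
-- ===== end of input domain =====

-- B replaces A's per-label binary-string formatting/zfill/char-parsing by direct shift-and-mask
-- bit extraction; equal return values are proved for every non-empty list.

-- ===== PORT A =====
-- int(c) for the characters '0'/'1' that bin()/zfill() produce; exact on those digit chars
def pvDigitVal (c : Char) : Int := (c.toNat : Int) - 48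

def bin_enc (lbl : List Int) : List (List Int) :=
  match PySem.List.min? lbl (fun x => x), PySem.List.max? lbl (fun x => x) with
  | some mi, some ma =>
      let length := (PySem.Int.toBinChars (ma - mi + 1)).length
      lbl.foldl (fun enc i =>
        let b := PySem.Chars.zfill (PySem.Int.toBinChars (i - mi)) (length : Int)
        enc ++ [b.map pvDigitVal]) []
  | _, _ => []  -- unreachable under Pre_ (min/max of a non-empty list)

-- ===== PORT B =====
def bin_enc_alt (lbl : List Int) : List (List Int) :=
  match PySem.List.min? lbl (fun x => x) with
  | none => []  -- unreachable under Pre_ (min/max of a non-empty list)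
  | some mi =>
      match PySem.List.max? lbl (fun x => x) with
      | none => []
      | some ma =>
          let length := (PySem.Int.toBinChars (ma - mi + 1)).length
          -- (length - 1 - k) is ≥ 0 in Python since k < length, so Nat subtraction is exact
          lbl.map (fun i =>
            (List.range length).map (fun k =>
              PySem.Int.band ((i - mi) >>> (length - 1 - k)) 1))

-- ===== PRECONDITION & SPEC =====
-- A raises ValueError on the empty list (min of empty sequence); B does the same.
def Pre_bin_enc (lbl : List Int) : Prop := lbl ≠ []
instance (lbl : List Int) : Decidable (Pre_bin_enc lbl) := by unfold Pre_bin_enc; infer_instance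
def pvWitness_bin_enc : List Int := ([3, 1, 2] : List Int)

def Spec_bin_enc (lbl : List Int) (out : List (List Int)) : Prop := out = bin_enc_alt lbl
instance (lbl : List Int) (out : List (List Int)) : Decidable (Spec_bin_enc lbl out) := by unfold Spec_bin_enc; infer_instance

-- ===== CLAIM (what is proved, stated in full; the proofs are below) =====
def Claim_equal_bin_enc : Prop := ∀ (lbl : List Int), Dom_bin_enc lbl → Pre_bin_enc lbl → Spec_bin_enc lbl (bin_enc lbl)

-- ===== LEMMAS AND PROOFS =====

-- MSB-first binary digits of a natural number (bin(n)[2:] digit values)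
def myBin (n : Nat) : List Nat :=
  if _h : n < 2 then [n] else myBin (n / 2) ++ [n % 2]
decreasing_by exact Nat.div_lt_self (by omega) (by omega)

theorem myBin_length_pos (n : Nat) : 0 < (myBin n).length := by
  unfold myBin; split <;> simp

theorem myBin_lt (n : Nat) : ∀ d ∈ myBin n, d < 2 := by
  induction n using Nat.strong_induction_on with
  | _ n ih =>
    unfold myBin; split
    · intro d hd; simp at hd; omega
    · intro d hd
      simp only [List.mem_append, List.mem_singleton] at hd
      rcases hd with h | h
      · exact ih (n / 2) (Nat.div_lt_self (by omega) (by omega)) d h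
      · omega

theorem myBin_len_mono : ∀ b a : Nat, a ≤ b → (myBin a).length ≤ (myBin b).length := by
  intro b
  induction b using Nat.strong_induction_on with
  | _ b ih =>
    intro a hab
    by_cases hb : b < 2
    · have : a < 2 := by omega
      unfold myBin; simp [this, hb]
    · by_cases ha : a < 2
      · rw [show myBin a = [a] by unfold myBin; simp [ha]]
        simpa using myBin_length_pos b
      · rw [show myBin a = myBin (a / 2) ++ [a % 2] by conv_lhs => unfold myBin; simp [ha]]
        rw [show myBin b = myBin (b / 2) ++ [b % 2] by conv_lhs => unfold myBin; simp [hb]]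
        simp only [List.length_append, List.length_singleton]
        have := ih (b / 2) (Nat.div_lt_self (by omega) (by omega)) (a / 2)
          (Nat.div_le_div_right hab)
        omega

theorem toDigitsCore_two (f : Nat) : 0 < f → ∀ (n : Nat) (acc : List Char), n < 2 ^ f →
    Nat.toDigitsCore 2 f n acc = (myBin n).map Nat.digitChar ++ acc := by
  induction f with
  | zero => omega
  | succ f ihf =>
    intro _ n acc hn
    rw [Nat.toDigitsCore]
    by_cases h2 : n < 2
    · have hz : n / 2 = 0 := by omega
      have hm : n % 2 = n := by omega
      rw [show myBin n = [n] by unfold myBin; simp [h2]]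
      simp [hz, hm]
    · have hdiv : n / 2 ≠ 0 := by omega
      have hf : 0 < f := by
        by_contra h
        have : f = 0 := by omega
        subst this; simp at hn; omega
      have hlt : n / 2 < 2 ^ f := by
        rw [Nat.div_lt_iff_lt_mul (by omega)]
        calc n < 2 ^ (f + 1) := hn
        _ = 2 ^ f * 2 := by ring
      rw [show myBin n = myBin (n / 2) ++ [n % 2] by conv_lhs => unfold myBin; simp [h2]]
      simp only [hdiv, if_false]
      rw [ihf hf (n / 2) _ hlt]
      simp

theorem toDigits_two (n : Nat) : Nat.toDigits 2 n = (myBin n).map Nat.digitChar := by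
  have h := toDigitsCore_two (n + 1) (by omega) n []
    (lt_of_lt_of_le (Nat.lt_two_pow_self) (Nat.pow_le_pow_right (by omega) (by omega)))
  simpa [Nat.toDigits] using h

theorem toBinChars_nonneg (n : Int) (h : 0 ≤ n) :
    PySem.Int.toBinChars n = (myBin n.toNat).map Nat.digitChar := by
  unfold PySem.Int.toBinChars
  rw [if_neg (by omega)]
  exact toDigits_two n.toNat

theorem zfill_digits (m : Nat) (w : Int) :
    PySem.Chars.zfill ((myBin m).map Nat.digitChar) w =
      List.replicate (w.toNat - (myBin m).length) '0' ++ (myBin m).map Nat.digitChar := by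
  obtain ⟨d, ds, hb⟩ := List.exists_cons_of_ne_nil
    (show myBin m ≠ [] by have := myBin_length_pos m; intro h; simp [h] at this)
  have hd : d < 2 := myBin_lt m d (by simp [hb])
  have hdc : ¬(Nat.digitChar d = '+' ∨ Nat.digitChar d = '-') := by
    interval_cases d <;> decide
  unfold PySem.Chars.zfill
  by_cases hw : w ≤ (((myBin m).map Nat.digitChar).length : Int)
  · rw [if_pos hw]
    have : w.toNat - (myBin m).length = 0 := by
      simp only [List.length_map] at hw
      omega
    simp [this]
  · rw [if_neg hw]
    rw [hb]
    simp only [List.map_cons]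
    simp [hdc]

theorem bits_eq : ∀ (L m : Nat), (myBin m).length ≤ L →
    (List.range L).map (fun k => (m >>> (L - 1 - k)) &&& 1) =
      List.replicate (L - (myBin m).length) 0 ++ myBin m := by
  intro L
  induction L with
  | zero => intro m hm; have := myBin_length_pos m; omega
  | succ L ih =>
    intro m hm
    rw [List.range_succ, List.map_append]
    by_cases h2 : m < 2
    · rw [show myBin m = [m] by unfold myBin; simp [h2]]
      have hpref : (List.range L).map (fun k => (m >>> (L + 1 - 1 - k)) &&& 1) =
          List.replicate L 0 := by
        rw [List.eq_replicate_iff]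
        constructor
        · simp
        · intro b hb
          simp only [List.mem_map, List.mem_range] at hb
          obtain ⟨k, hk, hbk⟩ := hb
          have hs : L + 1 - 1 - k = (L - 1 - k) + 1 ∨ (L + 1 - 1 - k ≥ 1) := by omega
          have : m >>> (L + 1 - 1 - k) = 0 := by
            rw [Nat.shiftRight_eq_div_pow]
            have : L + 1 - 1 - k ≥ 1 := by omega
            have h21 : 2 ^ 1 ≤ 2 ^ (L + 1 - 1 - k) := Nat.pow_le_pow_right (by omega) this
            exact Nat.div_eq_of_lt (by omega)
          rw [← hbk, this]
          decide
      rw [hpref]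
      simp [Nat.and_one_is_mod]
      omega
    · rw [show myBin m = myBin (m / 2) ++ [m % 2] by conv_lhs => unfold myBin; simp [h2]]
      have hlen : (myBin (m / 2)).length ≤ L := by
        have : (myBin (m / 2) ++ [m % 2]).length ≤ L + 1 := by
          rw [show myBin (m / 2) ++ [m % 2] = myBin m by conv_rhs => unfold myBin; simp [h2]]
          exact hm
        simpa using this
      have hpref : (List.range L).map (fun k => (m >>> (L + 1 - 1 - k)) &&& 1) =
          (List.range L).map (fun k => ((m / 2) >>> (L - 1 - k)) &&& 1) := by
        apply List.map_congr_left
        intro k hk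
        simp only [List.mem_range] at hk
        have hs : L + 1 - 1 - k = (L - 1 - k) + 1 := by omega
        rw [hs, Nat.shiftRight_eq_div_pow, Nat.shiftRight_eq_div_pow, pow_succ]
        rw [Nat.div_div_eq_div_mul, Nat.mul_comm, ← Nat.div_div_eq_div_mul]
      rw [hpref, ih (m / 2) hlen]
      have : L + 1 - 1 - L = 0 := by omega
      simp [Nat.and_one_is_mod, List.append_assoc]

theorem foldl_push {α β : Type} (f : α → β) :
    ∀ (l : List α) (acc : List β), l.foldl (fun e i => e ++ [f i]) acc = acc ++ l.map f := by
  intro l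
  induction l with
  | nil => simp
  | cons x t ih => intro acc; simp [List.foldl_cons, ih, List.append_assoc]

-- ===== VERDICT (by name: the statement is the Claim_ definition above) =====
theorem bin_enc_spec : Claim_equal_bin_enc := by
  intro lbl _ hpre
  unfold Spec_bin_enc bin_enc bin_enc_alt
  rcases hmin : PySem.List.min? lbl (fun x => x) with _ | mi
  · exact absurd ((PySem.List.min?_eq_none_iff _ _).mp hmin) hpre
  rcases hmax : PySem.List.max? lbl (fun x => x) with _ | ma
  · exact absurd ((PySem.List.max?_eq_none_iff _ _).mp hmax) hpre
  simp only
  rw [foldl_push]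
  rw [List.nil_append]
  apply List.map_congr_left
  intro i hi
  have hmi : mi ≤ i := PySem.List.min?_isMin hmin i hi
  have hma : i ≤ ma := PySem.List.max?_isMax hmax i hi
  have hv : (0:Int) ≤ i - mi := by omega
  have hlen : (myBin (i - mi).toNat).length ≤ (PySem.Int.toBinChars (ma - mi + 1)).length := by
    rw [toBinChars_nonneg _ (by omega : (0:Int) ≤ ma - mi + 1), List.length_map]
    exact myBin_len_mono _ _ (Int.toNat_le_toNat (by omega))
  set L := (PySem.Int.toBinChars (ma - mi + 1)).length with hLdef
  have hr : ∀ k, PySem.Int.band ((i - mi) >>> (L - 1 - k)) 1 = (((i - mi).toNat >>> (L - 1 - k) &&& 1 : Nat) : Int) := by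
    intro k
    conv_lhs => rw [← Int.toNat_of_nonneg hv]
    rw [← Int.natCast_shiftRight]
    exact_mod_cast PySem.Int.band_natCast _ 1
  have hB : (List.range L).map (fun k => PySem.Int.band ((i - mi) >>> (L - 1 - k)) 1)
      = (List.replicate (L - (myBin (i - mi).toNat).length) 0 ++ myBin (i - mi).toNat).map
          Int.ofNat := by
    have h2 : ((List.range L).map (fun k => (i - mi).toNat >>> (L - 1 - k) &&& 1)).map Int.ofNat
        = (List.replicate (L - (myBin (i - mi).toNat).length) 0 ++ myBin (i - mi).toNat).map
            Int.ofNat := congrArg _ (bits_eq L _ hlen)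
    rw [← h2, List.map_map]
    exact List.map_congr_left (fun k _ => hr k)
  rw [hB, toBinChars_nonneg _ hv, zfill_digits]
  rw [List.map_append, List.map_append, List.map_map]
  congr 1
  · simp [pvDigitVal]
  · apply List.map_congr_left
    intro d hd
    have hd2 : d < 2 := myBin_lt _ d hd
    interval_cases d <;> decide
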